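-- pv_equiv track=rewrite | github.com/clusterag/auth-utils | accountmaker/accountmaker.py | split_classes
-- ===== SOURCE A (Python) =====
-- def split_classes(list):
--     classes = {}
--     for student in list:
--         if (student[0] in classes):
--             classes[student[0]].append(student)
--         else:
--             classes[student[0]] = [["Klasse", "Vorname", "Nachname", "Benutzername", "Passwort"]]
--             classes[student[0]].append(student)
--     return(classes)
-- ===== SOURCE B (Python) =====
-- def split_classes(list):
--     header = ["Klasse", "Vorname", "Nachname", "Benutzername", "Passwort"]
--     keys = []
--     for student in list:
--         if student[0] not in keys:
--             keys.append(student[0])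
--     return {k: [header[:]] + [s for s in list if s[0] == k] for k in keys}
-- ===== Notes on version B (the rewrite author's own statement) =====
-- stated objective: alternative
-- what changed: Replaces the single insert-or-append grouping pass over a dict with a key-discovery pass (distinct class keys in first-appearance order) followed by a per-key filter of the original list in a dict comprehension.
import Mathlib
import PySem

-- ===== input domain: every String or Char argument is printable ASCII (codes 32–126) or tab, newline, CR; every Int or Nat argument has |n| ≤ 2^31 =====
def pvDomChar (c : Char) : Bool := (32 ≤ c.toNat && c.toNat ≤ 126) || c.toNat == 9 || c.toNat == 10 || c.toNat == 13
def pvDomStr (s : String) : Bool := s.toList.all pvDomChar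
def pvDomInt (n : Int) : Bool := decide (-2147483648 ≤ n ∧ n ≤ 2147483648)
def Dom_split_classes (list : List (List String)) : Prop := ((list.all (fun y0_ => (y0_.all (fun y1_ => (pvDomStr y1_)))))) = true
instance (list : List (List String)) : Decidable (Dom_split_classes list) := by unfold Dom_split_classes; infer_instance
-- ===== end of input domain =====

-- B replaces A's single insert-or-append dict-grouping pass by a key-discovery pass followed by a
-- per-key filter of the original list (objective: alternative decomposition, not faster).

-- the header row both programs prepend to every class
def pvHeader : List String := ["Klasse", "Vorname", "Nachname", "Benutzername", "Passwort"]

-- ===== PORT A =====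
-- student[0]: Pre_ guarantees every row is nonempty (Python raises IndexError on []), so List.headI is exact.
def split_classes (list : List (List String)) : List (String × List (List String)) :=
  (list.foldl (fun classes student =>
      if classes.contains student.headI then
        classes.modify student.headI [] (· ++ [student])          -- classes[student[0]].append(student)
      else
        ((classes.insert student.headI [pvHeader]).modify student.headI [] (· ++ [student])))
    PySem.Dict.empty).items

-- ===== PORT B =====
def split_classes_alt (list : List (List String)) : List (String × List (List String)) :=
  let keys := list.foldl (fun ks student => PySem.Set.add ks student.headI) PySem.Set.empty
  keys.map (fun k => (k, pvHeader :: list.filter (fun s => s.headI == k)))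

-- ===== PRECONDITION & SPEC =====
-- Pre_ excludes exactly the inputs containing an empty row, on which Python A raises IndexError.
def Pre_split_classes (list : List (List String)) : Prop := ∀ s ∈ list, s ≠ []
instance (list : List (List String)) : Decidable (Pre_split_classes list) := by unfold Pre_split_classes; infer_instance

def pvWitness_split_classes : List (List String) :=
  [["1a", "Ann", "B", "ab", "pw"], ["2b", "Cid", "D", "cd", "pw"], ["1a", "Eva", "F", "ef", "pw"]]

def Spec_split_classes (list : List (List String)) (out : List (String × List (List String))) : Prop := out = split_classes_alt list
instance (list : List (List String)) (out : List (String × List (List String))) : Decidable (Spec_split_classes list out) := by unfold Spec_split_classes; infer_instance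

-- ===== CLAIM (what is proved, stated in full; the proofs are below) =====
def Claim_equal_split_classes : Prop := ∀ (list : List (List String)), Dom_split_classes list → Pre_split_classes list → Spec_split_classes list (split_classes list)

-- ===== LEMMAS AND PROOFS =====

-- the dict A has built after processing prefix p, described in B's key-then-filter shape
def pvDOf (p : List (List String)) : PySem.Dict String (List (List String)) :=
  PySem.Dict.mk ((PySem.Set.ofList (p.map List.headI)).map
    (fun k => (k, pvHeader :: p.filter (fun s => s.headI == k))))

def pvStep (d : PySem.Dict String (List (List String))) (student : List String) :
    PySem.Dict String (List (List String)) :=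
  if d.contains student.headI then
    d.modify student.headI [] (· ++ [student])
  else
    ((d.insert student.headI [pvHeader]).modify student.headI [] (· ++ [student]))

theorem pvDOf_keys (p : List (List String)) :
    (pvDOf p).keys = PySem.Set.ofList (p.map List.headI) := by
  show List.map _ (pvDOf p).items = _
  simp only [pvDOf]
  rw [List.map_map]
  exact List.map_id _

theorem pvStep_pvDOf (p : List (List String)) (s : List String) :
    pvStep (pvDOf p) s = pvDOf (p ++ [s]) := by
  have hnd : (pvDOf p).keys.Nodup := by
    rw [pvDOf_keys]; exact PySem.Set.nodup_ofList _
  have hkeys2 : PySem.Set.ofList ((p ++ [s]).map List.headI)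
      = PySem.Set.add (PySem.Set.ofList (p.map List.headI)) s.headI := by
    rw [List.map_append, PySem.Set.ofList_append]
    show PySem.Set.update _ [s.headI] = _
    rw [PySem.Set.update_cons, PySem.Set.update_nil]
  by_cases hc : s.headI ∈ PySem.Set.ofList (p.map List.headI)
  · -- key already present: A appends to the existing class list
    have hcont : (pvDOf p).contains s.headI = true := by
      rw [PySem.Dict.contains_eq_decide_mem_keys, pvDOf_keys]; simpa using hc
    have hmem : (s.headI, pvHeader :: p.filter (fun t => t.headI == s.headI)) ∈ (pvDOf p).items := by
      show _ ∈ List.map (fun k => (k, pvHeader :: p.filter (fun t => t.headI == k))) _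
      exact List.mem_map_of_mem hc
    have hget : (pvDOf p).getD s.headI []
        = pvHeader :: p.filter (fun t => t.headI == s.headI) :=
      PySem.Dict.getD_of_mem_items _ hmem hnd _
    have hadd : PySem.Set.add (PySem.Set.ofList (p.map List.headI)) s.headI
        = PySem.Set.ofList (p.map List.headI) := by
      simp [PySem.Set.add, PySem.Set.contains, hc]
    rw [pvStep, if_pos hcont, PySem.Dict.modify, hget]
    apply PySem.Dict.ext
    rw [PySem.Dict.items_insert, hcont]
    simp only [if_true]
    show ((PySem.Set.ofList (p.map List.headI)).map _).map _ = ((PySem.Set.ofList ((p ++ [s]).map List.headI)).map _)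
    rw [hkeys2, hadd, List.map_map]
    apply List.map_congr_left
    intro k _
    by_cases hk : k = s.headI
    · subst hk
      simp [List.filter_append]
    · have hne : (k == s.headI) = false := by simpa using hk
      have hne2 : (s.headI == k) = false := by simpa using (Ne.symm hk)
      simp [Function.comp, hne, List.filter_append, hne2]
  · -- fresh key: A creates a new class list starting with the header
    have hcont : (pvDOf p).contains s.headI = false := by
      rw [PySem.Dict.contains_eq_decide_mem_keys, pvDOf_keys]; simpa using hc
    have hadd : PySem.Set.add (PySem.Set.ofList (p.map List.headI)) s.headI
        = PySem.Set.ofList (p.map List.headI) ++ [s.headI] := by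
      simp [PySem.Set.add, PySem.Set.contains, hc]
    have hfilnil : p.filter (fun t => t.headI == s.headI) = [] := by
      apply List.filter_eq_nil_iff.mpr
      intro x hx
      have : x.headI ∈ PySem.Set.ofList (p.map List.headI) := by
        rw [PySem.Set.mem_ofList]; exact List.mem_map_of_mem hx
      simp only [beq_iff_eq]
      intro h; exact hc (h ▸ this)
    rw [pvStep, if_neg (by simp [hcont]), PySem.Dict.modify,
      PySem.Dict.getD_insert_self, PySem.Dict.insert_insert_self]
    apply PySem.Dict.ext
    rw [PySem.Dict.items_insert, hcont]
    simp only [Bool.false_eq_true, if_false]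
    show ((PySem.Set.ofList (p.map List.headI)).map _) ++ _ = ((PySem.Set.ofList ((p ++ [s]).map List.headI)).map _)
    rw [hkeys2, hadd, List.map_append]
    congr 1
    · apply List.map_congr_left
      intro k hk
      have hne2 : (s.headI == k) = false := by
        simp only [beq_eq_false_iff_ne]; intro h; exact hc (h ▸ hk)
      simp [List.filter_append, hne2]
    · simp [List.filter_append, hfilnil]

theorem pvFoldl_pvDOf (l p : List (List String)) :
    l.foldl pvStep (pvDOf p) = pvDOf (p ++ l) := by
  induction l generalizing p with
  | nil => simp
  | cons s l ih =>
      rw [List.foldl_cons, pvStep_pvDOf, ih]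
      simp

-- ===== VERDICT (by name: the statement is the Claim_ definition above) =====
theorem split_classes_spec : Claim_equal_split_classes := by
  intro list _ _
  show _ = _
  have hA : split_classes list = (pvDOf list).items := by
    have h0 : pvDOf [] = PySem.Dict.empty := by
      simp [pvDOf, PySem.Set.ofList, PySem.Dict.empty]
    rw [split_classes, show (fun (classes : PySem.Dict String (List (List String))) student =>
        if classes.contains student.headI then
          classes.modify student.headI [] (· ++ [student])
        else
          ((classes.insert student.headI [pvHeader]).modify student.headI [] (· ++ [student]))) = pvStep
      from rfl, ← h0, pvFoldl_pvDOf]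
    simp
  rw [hA, split_classes_alt]
  have hkeys : list.foldl (fun ks student => PySem.Set.add ks student.headI) PySem.Set.empty
      = PySem.Set.ofList (list.map List.headI) := by
    rw [PySem.Set.ofList, List.foldl_map]
  simp only [hkeys, pvDOf]
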